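-- pv_equiv track=rewrite | github.com/ancestor-mithril/UAIC_FII_CN | Lab_03/functions.py | bonus
-- ===== SOURCE A (Python) =====
-- def bonus(tridiag_1, tridiag_2):
--     n = len(tridiag_1[0])
--     q_1 = n - len(tridiag_1[1])
--     p_1 = n - len(tridiag_1[2])
--     q_2 = n - len(tridiag_2[1])
--     p_2 = n - len(tridiag_2[2])
--     rr = [[] for i in range(n)]
--     for line in range(n):
--         for col in range(n):
--             v_1 = {
--                 col: tridiag_2[0][col],
--             }
--             if col >= q_2:
--                 v_1.update({col - q_2: tridiag_2[1][col - q_2]})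
--             if col < len(tridiag_2[2]):
--                 v_1.update({col + p_2: tridiag_2[2][col]})
--             v_2 = {
--                 line: tridiag_1[0][line]
--             }
--             if line < len(tridiag_1[1]):
--                 v_2.update({line + q_1: tridiag_1[1][line]})
--             if line >= p_1:
--                 v_2.update({line - p_1: tridiag_1[1][line - p_1]})
--             sumus = 0
--             for i in v_1.keys():
--                 if i in v_2:
--                     sumus += v_1[i] * v_2[i]
--             if sumus != 0:
--                 rr[line].append([sumus, col])
--     return rr
-- ===== SOURCE B (Python) =====
-- def bonus(tridiag_1, tridiag_2):
--     n = len(tridiag_1[0])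
--     q_1 = n - len(tridiag_1[1])
--     p_1 = n - len(tridiag_1[2])
--     q_2 = n - len(tridiag_2[1])
--     p_2 = n - len(tridiag_2[2])
--     rr = []
--     for line in range(n):
--         # row `line` of matrix 1, as a sparse dict {col index: value}
--         v_2 = {line: tridiag_1[0][line]}
--         if line < len(tridiag_1[1]):
--             v_2[line + q_1] = tridiag_1[1][line]
--         if line >= p_1:
--             v_2[line - p_1] = tridiag_1[1][line - p_1]
--         # only columns hit by the band structure can give a nonzero dot product
--         cand = set()
--         for i in v_2:
--             for col in (i, i + q_2, i - p_2):
--                 if 0 <= col < n: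
--                     cand.add(col)
--         row = []
--         for col in sorted(cand):
--             # column `col` of matrix 2, as a sparse dict {row index: value}
--             v_1 = {col: tridiag_2[0][col]}
--             if col >= q_2:
--                 v_1[col - q_2] = tridiag_2[1][col - q_2]
--             if col < len(tridiag_2[2]):
--                 v_1[col + p_2] = tridiag_2[2][col]
--             s = sum(v_1[k] * v for k, v in v_2.items() if k in v_1)
--             if s != 0:
--                 row.append([s, col])
--         rr.append(row)
--     return rr
-- ===== Notes on version B (the rewrite author's own statement) =====
-- stated objective: faster
-- what changed: The inner loop over all n columns per row is replaced by enumerating, per row, the at most 9 candidate columns reachable through the band offsets (derived from the row's sparse dict), accumulating a row list directly, so the whole product is one pass over rows instead of n^2 dot products; the per-entry dot product walks the row dict instead of the column dict.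
import Mathlib
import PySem

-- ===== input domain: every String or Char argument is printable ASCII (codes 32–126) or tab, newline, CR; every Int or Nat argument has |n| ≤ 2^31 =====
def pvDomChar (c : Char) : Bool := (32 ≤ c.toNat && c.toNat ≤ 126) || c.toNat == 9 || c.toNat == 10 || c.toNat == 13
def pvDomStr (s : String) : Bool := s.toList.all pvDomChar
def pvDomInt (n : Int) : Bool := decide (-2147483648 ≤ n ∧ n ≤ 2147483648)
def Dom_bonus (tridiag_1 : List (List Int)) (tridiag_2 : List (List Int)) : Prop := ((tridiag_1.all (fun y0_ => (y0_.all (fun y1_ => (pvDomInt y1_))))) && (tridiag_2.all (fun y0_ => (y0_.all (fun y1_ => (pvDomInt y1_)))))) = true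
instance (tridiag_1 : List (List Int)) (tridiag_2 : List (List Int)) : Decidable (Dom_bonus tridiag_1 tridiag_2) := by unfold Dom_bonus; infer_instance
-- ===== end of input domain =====

-- B replaces A's inner loop over all n columns by the ≤ 9 candidate columns reachable
-- through the band offsets, making the product one pass over the rows (measured faster).
-- Python A preallocates rr = [[] …] and appends only to rr[line] during iteration `line`
-- of the outer loop, so each port builds the row for `line` directly and maps over lines.

-- ===== PORT A =====
def bonus (tridiag_1 : List (List Int)) (tridiag_2 : List (List Int)) : List (List (List Int)) :=
  let t10 := PySem.List.pyGetD tridiag_1 0 []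
  let t11 := PySem.List.pyGetD tridiag_1 1 []
  let t12 := PySem.List.pyGetD tridiag_1 2 []
  let t20 := PySem.List.pyGetD tridiag_2 0 []
  let t21 := PySem.List.pyGetD tridiag_2 1 []
  let t22 := PySem.List.pyGetD tridiag_2 2 []
  let n : Int := t10.length
  let q_1 : Int := n - t11.length
  let p_1 : Int := n - t12.length
  let q_2 : Int := n - t21.length
  let p_2 : Int := n - t22.length
  (PySem.List.pyRange 0 n 1).map (fun line =>
    (PySem.List.pyRange 0 n 1).foldl (fun row col =>
      let v_1 : PySem.Dict Int Int := PySem.Dict.empty.insert col (PySem.List.pyGetD t20 col 0)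
      let v_1 := if q_2 ≤ col then v_1.insert (col - q_2) (PySem.List.pyGetD t21 (col - q_2) 0) else v_1
      let v_1 := if col < (t22.length : Int) then v_1.insert (col + p_2) (PySem.List.pyGetD t22 col 0) else v_1
      let v_2 : PySem.Dict Int Int := PySem.Dict.empty.insert line (PySem.List.pyGetD t10 line 0)
      let v_2 := if line < (t11.length : Int) then v_2.insert (line + q_1) (PySem.List.pyGetD t11 line 0) else v_2
      let v_2 := if p_1 ≤ line then v_2.insert (line - p_1) (PySem.List.pyGetD t11 (line - p_1) 0) else v_2
      let sumus : Int := (PySem.Dict.keys v_1).foldl (fun s i =>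
        if PySem.Dict.contains v_2 i then s + PySem.Dict.getD v_1 i 0 * PySem.Dict.getD v_2 i 0 else s) 0
      if sumus ≠ 0 then row ++ [[sumus, col]] else row) [])

-- ===== PORT B =====
def bonus_alt (tridiag_1 : List (List Int)) (tridiag_2 : List (List Int)) : List (List (List Int)) :=
  let t10 := PySem.List.pyGetD tridiag_1 0 []
  let t11 := PySem.List.pyGetD tridiag_1 1 []
  let t12 := PySem.List.pyGetD tridiag_1 2 []
  let t20 := PySem.List.pyGetD tridiag_2 0 []
  let t21 := PySem.List.pyGetD tridiag_2 1 []
  let t22 := PySem.List.pyGetD tridiag_2 2 []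
  let n : Int := t10.length
  let q_1 : Int := n - t11.length
  let p_1 : Int := n - t12.length
  let q_2 : Int := n - t21.length
  let p_2 : Int := n - t22.length
  (PySem.List.pyRange 0 n 1).map (fun line =>
    let v_2 : PySem.Dict Int Int := PySem.Dict.empty.insert line (PySem.List.pyGetD t10 line 0)
    let v_2 := if line < (t11.length : Int) then v_2.insert (line + q_1) (PySem.List.pyGetD t11 line 0) else v_2
    let v_2 := if p_1 ≤ line then v_2.insert (line - p_1) (PySem.List.pyGetD t11 (line - p_1) 0) else v_2
    let cand : PySem.Set Int := (PySem.Dict.keys v_2).foldl (fun cs i =>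
      [i, i + q_2, i - p_2].foldl (fun cs col =>
        if 0 ≤ col ∧ col < n then PySem.Set.add cs col else cs) cs) PySem.Set.empty
    (PySem.List.sorted cand (fun x => x) false).foldl (fun row col =>
      let v_1 : PySem.Dict Int Int := PySem.Dict.empty.insert col (PySem.List.pyGetD t20 col 0)
      let v_1 := if q_2 ≤ col then v_1.insert (col - q_2) (PySem.List.pyGetD t21 (col - q_2) 0) else v_1
      let v_1 := if col < (t22.length : Int) then v_1.insert (col + p_2) (PySem.List.pyGetD t22 col 0) else v_1
      let s : Int := (PySem.Dict.items v_2).foldl (fun acc kv =>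
        if PySem.Dict.contains v_1 kv.1 then acc + PySem.Dict.getD v_1 kv.1 0 * kv.2 else acc) 0
      if s ≠ 0 then row ++ [[s, col]] else row) [])

-- ===== PRECONDITION & SPEC =====
-- Pre_bonus holds exactly on the inputs where the Python A returns (elsewhere it raises
-- IndexError: fewer than 3 diagonals, a too-short main diagonal of tridiag_2, or a lower
-- diagonal of tridiag_1 longer than its upper diagonal, which A indexes for both bands).
def Pre_bonus (tridiag_1 : List (List Int)) (tridiag_2 : List (List Int)) : Prop :=
  3 ≤ tridiag_1.length ∧ 3 ≤ tridiag_2.length ∧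
  ((tridiag_1.getD 0 []).length = 0 ∨
    ((tridiag_1.getD 0 []).length ≤ (tridiag_2.getD 0 []).length ∧
      ((tridiag_1.getD 2 []).length = 0 ∨
        (tridiag_1.getD 2 []).length ≤ (tridiag_1.getD 1 []).length)))
instance (tridiag_1 : List (List Int)) (tridiag_2 : List (List Int)) : Decidable (Pre_bonus tridiag_1 tridiag_2) := by unfold Pre_bonus; infer_instance
def pvWitness_bonus : List (List Int) × List (List Int) := (([[1, 2], [3], [4]], [[5, 6], [7], [8]]))
def Spec_bonus (tridiag_1 : List (List Int)) (tridiag_2 : List (List Int)) (out : List (List (List Int))) : Prop := out = bonus_alt tridiag_1 tridiag_2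
instance (tridiag_1 : List (List Int)) (tridiag_2 : List (List Int)) (out : List (List (List Int))) : Decidable (Spec_bonus tridiag_1 tridiag_2 out) := by unfold Spec_bonus; infer_instance

-- ===== CLAIM (what is proved, stated in full; the proofs are below) =====
def Claim_equal_bonus : Prop := ∀ (tridiag_1 : List (List Int)) (tridiag_2 : List (List Int)), Dom_bonus tridiag_1 tridiag_2 → Pre_bonus tridiag_1 tridiag_2 → Spec_bonus tridiag_1 tridiag_2 (bonus tridiag_1 tridiag_2)

-- ===== LEMMAS AND PROOFS =====

-- a conditional accumulating foldl is a sum over the filtered list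
theorem pv_foldl_if_add {α : Type} (l : List α) (p : α → Prop) [DecidablePred p]
    (g : α → Int) (a : Int) :
    l.foldl (fun s x => if p x then s + g x else s) a
      = a + ((l.filter (fun x => decide (p x))).map g).sum := by
  induction l generalizing a with
  | nil => simp
  | cons x xs ih =>
      by_cases h : p x <;> simp [h, ih, add_assoc]

-- skipping elements on which the step is the identity
theorem pv_foldl_filter_skip {α β : Type} (l : List α) (q : α → Bool) (f : β → α → β)
    (h : ∀ x ∈ l, q x = false → ∀ acc, f acc x = acc) (init : β) :
    l.foldl f init = (l.filter q).foldl f init := by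
  induction l generalizing init with
  | nil => rfl
  | cons x xs ih =>
      cases hq : q x with
      | true => simp [hq, ih (fun y hy => h y (List.mem_cons_of_mem _ hy)) (f init x)]
      | false =>
          simp [hq, h x (List.mem_cons_self) hq init,
            ih (fun y hy => h y (List.mem_cons_of_mem _ hy)) init]

theorem pv_mem_foldl_add_if (ms : List Int) (p : Int → Prop) [DecidablePred p]
    (cs : PySem.Set Int) (y : Int) :
    (y ∈ ms.foldl (fun cs c => if p c then PySem.Set.add cs c else cs) cs)
      ↔ y ∈ cs ∨ (y ∈ ms ∧ p y) := by
  induction ms generalizing cs with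
  | nil => simp
  | cons c ms ih =>
      by_cases h : p c
      · simp only [List.foldl_cons, if_pos h, ih, PySem.Set.mem_add, List.mem_cons]
        constructor
        · rintro ((hy | rfl) | ⟨hy, hp⟩)
          · exact Or.inl hy
          · exact Or.inr ⟨Or.inl rfl, h⟩
          · exact Or.inr ⟨Or.inr hy, hp⟩
        · rintro (hy | ⟨(rfl | hy), hp⟩)
          · exact Or.inl (Or.inl hy)
          · exact Or.inl (Or.inr rfl)
          · exact Or.inr ⟨hy, hp⟩
      · simp only [List.foldl_cons, if_neg h, ih, List.mem_cons]
        constructor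
        · rintro (hy | ⟨hy, hp⟩)
          · exact Or.inl hy
          · exact Or.inr ⟨Or.inr hy, hp⟩
        · rintro (hy | ⟨(rfl | hy), hp⟩)
          · exact Or.inl hy
          · exact absurd hp h
          · exact Or.inr ⟨hy, hp⟩

theorem pv_nodup_foldl_add_if (ms : List Int) (p : Int → Prop) [DecidablePred p]
    (cs : PySem.Set Int) (h : cs.Nodup) :
    (ms.foldl (fun cs c => if p c then PySem.Set.add cs c else cs) cs).Nodup := by
  induction ms generalizing cs with
  | nil => exact h
  | cons c ms ih =>
      by_cases hp : p c
      · simpa [hp] using ih _ (PySem.Set.nodup_add cs c h)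
      · simpa [hp] using ih _ h

-- membership in B's candidate set
theorem pv_mem_cand_aux (ks : List Int) (q2 p2 n : Int) (cs : PySem.Set Int) (y : Int) :
    (y ∈ ks.foldl (fun cs i => [i, i + q2, i - p2].foldl (fun cs col =>
        if 0 ≤ col ∧ col < n then PySem.Set.add cs col else cs) cs) cs)
      ↔ y ∈ cs ∨ ((0 ≤ y ∧ y < n) ∧ ∃ i ∈ ks, y = i ∨ y = i + q2 ∨ y = i - p2) := by
  induction ks generalizing cs with
  | nil => simp
  | cons k ks ih =>
      rw [List.foldl_cons, ih, pv_mem_foldl_add_if]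
      simp only [List.mem_cons]
      constructor
      · rintro ((hy | ⟨hm, hb⟩) | ⟨hb, i, hi, hy⟩)
        · exact Or.inl hy
        · exact Or.inr ⟨hb, k, Or.inl rfl, by simpa using hm⟩
        · exact Or.inr ⟨hb, i, Or.inr hi, hy⟩
      · rintro (hy | ⟨hb, i, (rfl | hi), hy⟩)
        · exact Or.inl (Or.inl hy)
        · exact Or.inl (Or.inr ⟨by simpa using hy, hb⟩)
        · exact Or.inr ⟨hb, i, hi, hy⟩

theorem pv_mem_cand (ks : List Int) (q2 p2 n : Int) (y : Int) :
    (y ∈ ks.foldl (fun cs i => [i, i + q2, i - p2].foldl (fun cs col =>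
        if 0 ≤ col ∧ col < n then PySem.Set.add cs col else cs) cs) PySem.Set.empty)
      ↔ ((0 ≤ y ∧ y < n) ∧ ∃ i ∈ ks, y = i ∨ y = i + q2 ∨ y = i - p2) := by
  simpa [PySem.Set.empty] using pv_mem_cand_aux ks q2 p2 n PySem.Set.empty y

theorem pv_nodup_cand (ks : List Int) (q2 p2 n : Int) :
    (ks.foldl (fun cs i => [i, i + q2, i - p2].foldl (fun cs col =>
        if 0 ≤ col ∧ col < n then PySem.Set.add cs col else cs) cs) PySem.Set.empty).Nodup := by
  have aux : ∀ (ks : List Int) (cs : PySem.Set Int), cs.Nodup →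
      (ks.foldl (fun cs i => [i, i + q2, i - p2].foldl (fun cs col =>
        if 0 ≤ col ∧ col < n then PySem.Set.add cs col else cs) cs) cs).Nodup := by
    intro ks
    induction ks with
    | nil => intro cs h; exact h
    | cons k ks ih => intro cs h; exact ih _ (pv_nodup_foldl_add_if _ _ _ h)
  exact aux ks PySem.Set.empty (by simp [PySem.Set.empty])

-- the dot product computed over d's keys equals the one computed over e's items
theorem pv_sum_swap (d e : PySem.Dict Int Int) (hd : (PySem.Dict.keys d).Nodup)
    (he : (PySem.Dict.keys e).Nodup) :
    (PySem.Dict.keys d).foldl (fun s i =>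
        if PySem.Dict.contains e i then s + PySem.Dict.getD d i 0 * PySem.Dict.getD e i 0 else s) 0
      = (PySem.Dict.items e).foldl (fun acc kv =>
        if PySem.Dict.contains d kv.1 then acc + PySem.Dict.getD d kv.1 0 * kv.2 else acc) 0 := by
  rw [pv_foldl_if_add (PySem.Dict.keys d) (fun i => PySem.Dict.contains e i = true)
        (fun i => PySem.Dict.getD d i 0 * PySem.Dict.getD e i 0) 0,
      pv_foldl_if_add (PySem.Dict.items e) (fun kv => PySem.Dict.contains d kv.1 = true)
        (fun kv => PySem.Dict.getD d kv.1 0 * kv.2) 0,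
      PySem.Dict.items_eq_map_keys e he 0]
  simp only [List.filter_map, List.map_map, zero_add, Function.comp_def, Bool.decide_eq_true]
  have hperm : ((PySem.Dict.keys d).filter (fun i => PySem.Dict.contains e i)).Perm
      ((PySem.Dict.keys e).filter (fun i => PySem.Dict.contains d i)) := by
    rw [List.perm_ext_iff_of_nodup (hd.filter _) (he.filter _)]
    intro x
    simp only [List.mem_filter, PySem.Dict.contains_iff_mem_keys]
    exact and_comm
  calc ((List.filter (fun i => PySem.Dict.contains e i) (PySem.Dict.keys d)).map
          (fun i => PySem.Dict.getD d i 0 * PySem.Dict.getD e i 0)).sum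
      = ((List.filter (fun i => PySem.Dict.contains d i) (PySem.Dict.keys e)).map
          (fun i => PySem.Dict.getD d i 0 * PySem.Dict.getD e i 0)).sum :=
        (hperm.map _).sum_eq
    _ = _ := by rfl

-- one line of the product: A's scan over all columns equals B's scan over the sorted
-- candidate set, for any row dict v2 and any column-dict builder w whose keys lie in
-- {col, col - q2, col + p2}
theorem pv_row (n q2 p2 : Int) (v2 : PySem.Dict Int Int) (w : Int → PySem.Dict Int Int)
    (hv2 : (PySem.Dict.keys v2).Nodup)
    (hw : ∀ col, (PySem.Dict.keys (w col)).Nodup)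
    (hwk : ∀ col k, k ∈ PySem.Dict.keys (w col) → k = col ∨ k = col - q2 ∨ k = col + p2) :
    (PySem.List.pyRange 0 n 1).foldl (fun row col =>
        if (PySem.Dict.keys (w col)).foldl (fun s i =>
            if PySem.Dict.contains v2 i then s + PySem.Dict.getD (w col) i 0 * PySem.Dict.getD v2 i 0 else s) 0 ≠ 0
        then row ++ [[(PySem.Dict.keys (w col)).foldl (fun s i =>
            if PySem.Dict.contains v2 i then s + PySem.Dict.getD (w col) i 0 * PySem.Dict.getD v2 i 0 else s) 0, col]]
        else row) []
      = (PySem.List.sorted ((PySem.Dict.keys v2).foldl (fun cs i =>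
            [i, i + q2, i - p2].foldl (fun cs col => if 0 ≤ col ∧ col < n then PySem.Set.add cs col else cs) cs)
            PySem.Set.empty) (fun x => x) false).foldl (fun row col =>
        if (PySem.Dict.items v2).foldl (fun acc kv =>
            if PySem.Dict.contains (w col) kv.1 then acc + PySem.Dict.getD (w col) kv.1 0 * kv.2 else acc) 0 ≠ 0
        then row ++ [[(PySem.Dict.items v2).foldl (fun acc kv =>
            if PySem.Dict.contains (w col) kv.1 then acc + PySem.Dict.getD (w col) kv.1 0 * kv.2 else acc) 0, col]]
        else row) [] := by
  have hswap := fun col => pv_sum_swap (w col) v2 (hw col) hv2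
  rw [PySem.List.foldl_congr_mem' _ _
      (fun row col =>
        if (PySem.Dict.items v2).foldl (fun acc kv =>
            if PySem.Dict.contains (w col) kv.1 then acc + PySem.Dict.getD (w col) kv.1 0 * kv.2 else acc) 0 ≠ 0
        then row ++ [[(PySem.Dict.items v2).foldl (fun acc kv =>
            if PySem.Dict.contains (w col) kv.1 then acc + PySem.Dict.getD (w col) kv.1 0 * kv.2 else acc) 0, col]]
        else row) []
      (by intro col _ acc; rw [hswap col])]
  have hsort : PySem.List.sorted ((PySem.Dict.keys v2).foldl (fun cs i =>
        [i, i + q2, i - p2].foldl (fun cs col => if 0 ≤ col ∧ col < n then PySem.Set.add cs col else cs) cs)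
        PySem.Set.empty) (fun x => x) false
      = (PySem.List.pyRange 0 n 1).filter (fun c => PySem.Set.contains
          ((PySem.Dict.keys v2).foldl (fun cs i =>
            [i, i + q2, i - p2].foldl (fun cs col => if 0 ≤ col ∧ col < n then PySem.Set.add cs col else cs) cs)
            PySem.Set.empty) c) := by
    apply PySem.List.sorted_eq_of_perm_of_pairwise_lt
    · rw [List.perm_ext_iff_of_nodup
        (((PySem.List.pairwise_lt_pyRange_one 0 n).filter _).imp (fun h => ne_of_lt h))
        (pv_nodup_cand _ q2 p2 n)]
      intro x
      simp only [List.mem_filter, PySem.Set.contains_iff, PySem.List.mem_pyRange_one]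
      constructor
      · exact fun h => h.2
      · intro h
        exact ⟨((pv_mem_cand _ q2 p2 n x).mp h).1, h⟩
    · exact (PySem.List.pairwise_lt_pyRange_one 0 n).filter _
  rw [hsort]
  apply pv_foldl_filter_skip
  intro col hcol hcand acc
  have hz : (PySem.Dict.items v2).foldl (fun acc kv =>
      if PySem.Dict.contains (w col) kv.1 then acc + PySem.Dict.getD (w col) kv.1 0 * kv.2 else acc) 0 = 0 := by
    rw [pv_foldl_if_add (PySem.Dict.items v2) (fun kv => PySem.Dict.contains (w col) kv.1 = true)
        (fun kv => PySem.Dict.getD (w col) kv.1 0 * kv.2) 0]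
    have hnil : (PySem.Dict.items v2).filter
        (fun kv => decide (PySem.Dict.contains (w col) kv.1 = true)) = [] := by
      rw [List.filter_eq_nil_iff]
      intro kv hkv
      simp only [Bool.decide_eq_true]
      intro hc
      have hk1 : kv.1 ∈ PySem.Dict.keys (w col) := (PySem.Dict.contains_iff_mem_keys _ _).mp hc
      have hk2 : kv.1 ∈ PySem.Dict.keys v2 := PySem.Dict.mem_keys_of_mem_items v2 hkv
      have hb : 0 ≤ col ∧ col < n := (PySem.List.mem_pyRange_one).mp hcol
      have hmem : col ∈ (PySem.Dict.keys v2).foldl (fun cs i =>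
          [i, i + q2, i - p2].foldl (fun cs c => if 0 ≤ c ∧ c < n then PySem.Set.add cs c else cs) cs)
          PySem.Set.empty := by
        apply (pv_mem_cand _ q2 p2 n col).mpr
        refine ⟨hb, kv.1, hk2, ?_⟩
        rcases hwk col kv.1 hk1 with h | h | h <;> omega
      rw [(PySem.Set.contains_iff _ _).mpr hmem] at hcand
      simp at hcand
    rw [hnil]
    simp
  rw [hz]
  simp

-- ===== VERDICT (by name: the statement is the Claim_ definition above) =====
theorem bonus_spec : Claim_equal_bonus := by
  intro tridiag_1 tridiag_2 _ _
  unfold Spec_bonus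
  simp only [bonus, bonus_alt]
  apply List.map_congr_left
  intro line hline
  apply pv_row
  · repeat' first
      | exact PySem.Dict.nodup_keys_empty
      | split_ifs
      | apply PySem.Dict.nodup_keys_insert
  · intro col
    repeat' first
      | exact PySem.Dict.nodup_keys_empty
      | split_ifs
      | apply PySem.Dict.nodup_keys_insert
  · intro col k hk
    split_ifs at hk <;>
      simp only [PySem.Dict.mem_keys_insert, PySem.Dict.keys_empty, List.not_mem_nil, or_false] at hk <;>
      omega
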